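-- pv_equiv track=rewrite | github.com/sudo-reboot-zion/KeepUp | backend/workflows/resolution_workflow.py | _count_consecutive_skips
-- ===== SOURCE A (Python) =====
-- def _count_consecutive_skips(skip_pattern: list) -> int:
--     """Count how many days in a row were skipped"""
--     if not skip_pattern:
--         return 0
--
--     consecutive = 0
--     for completed in reversed(skip_pattern):
--         if completed:
--             break
--         consecutive += 1
--
--     return consecutive
-- ===== SOURCE B (Python) =====
-- def _count_consecutive_skips(skip_pattern: list) -> int:
--     """Count how many days in a row were skipped"""
--     last = -1
--     for i, completed in enumerate(skip_pattern):
--         if completed: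
--             last = i
--     return len(skip_pattern) - 1 - last
-- ===== Notes on version B (the rewrite author's own statement) =====
-- stated objective: alternative
-- what changed: Replaces the backward early-stopping count with a single forward pass that records the index of the last completed day and returns len - 1 - last as closed-form arithmetic.
import Mathlib
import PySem

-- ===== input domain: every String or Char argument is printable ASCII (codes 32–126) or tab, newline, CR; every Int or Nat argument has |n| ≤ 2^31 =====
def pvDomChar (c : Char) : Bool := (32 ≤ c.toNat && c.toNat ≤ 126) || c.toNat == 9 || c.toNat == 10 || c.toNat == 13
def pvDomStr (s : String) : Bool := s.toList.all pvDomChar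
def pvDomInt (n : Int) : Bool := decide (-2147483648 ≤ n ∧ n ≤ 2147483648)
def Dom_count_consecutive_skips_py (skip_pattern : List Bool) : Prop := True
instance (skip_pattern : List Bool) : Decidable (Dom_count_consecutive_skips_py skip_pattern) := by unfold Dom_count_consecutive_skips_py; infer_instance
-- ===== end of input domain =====

-- B scans forward once, tracking the index of the last completed day, and returns
-- len - 1 - last (alternative decomposition; same exact result as A's backward count).

-- ===== PORT A =====
-- the `for completed in reversed(skip_pattern)` loop with its break and `consecutive` accumulator
def pvALoop : List Bool → Int → Int
  | [], consecutive => consecutive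
  | completed :: rest, consecutive =>
    if completed then consecutive else pvALoop rest (consecutive + 1)

def count_consecutive_skips_py (skip_pattern : List Bool) : Int :=
  if skip_pattern = [] then 0
  else pvALoop skip_pattern.reverse 0

-- ===== PORT B =====
def count_consecutive_skips_py_alt (skip_pattern : List Bool) : Int :=
  let last : Int :=
    (PySem.List.enumerate skip_pattern 0).foldl
      (fun last p => if p.2 then p.1 else last) (-1)
  (skip_pattern.length : Int) - 1 - last

-- ===== PRECONDITION & SPEC =====
def Spec_count_consecutive_skips_py (skip_pattern : List Bool) (out : Int) : Prop := out = count_consecutive_skips_py_alt skip_pattern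
instance (skip_pattern : List Bool) (out : Int) : Decidable (Spec_count_consecutive_skips_py skip_pattern out) := by unfold Spec_count_consecutive_skips_py; infer_instance

-- ===== CLAIM (what is proved, stated in full; the proofs are below) =====
def Claim_equal_count_consecutive_skips_py : Prop := ∀ (skip_pattern : List Bool), Dom_count_consecutive_skips_py skip_pattern → Spec_count_consecutive_skips_py skip_pattern (count_consecutive_skips_py skip_pattern)

-- ===== LEMMAS AND PROOFS =====

theorem pvALoop_acc (xs : List Bool) (acc : Int) :
    pvALoop xs acc = acc + pvALoop xs 0 := by
  induction xs generalizing acc with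
  | nil => simp [pvALoop]
  | cons b t ih =>
    by_cases hb : b
    · simp [pvALoop, hb]
    · simp only [pvALoop, if_neg hb]
      rw [ih (acc + 1), ih (0 + 1)]; ring

theorem A_append (l : List Bool) (b : Bool) :
    count_consecutive_skips_py (l ++ [b]) =
      if b then 0 else count_consecutive_skips_py l + 1 := by
  have hne : l ++ [b] ≠ [] := by simp
  simp only [count_consecutive_skips_py, if_neg hne, List.reverse_append,
    List.reverse_singleton, List.singleton_append]
  by_cases hb : b
  · simp [pvALoop, hb]
  · simp only [pvALoop, if_neg hb]
    rw [pvALoop_acc]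
    cases l with
    | nil => simp [pvALoop]
    | cons x t =>
      rw [if_neg (List.cons_ne_nil x t)]
      ring

theorem B_append (l : List Bool) (b : Bool) :
    count_consecutive_skips_py_alt (l ++ [b]) =
      if b then 0 else count_consecutive_skips_py_alt l + 1 := by
  simp only [count_consecutive_skips_py_alt, PySem.List.enumerate_append,
    List.foldl_append, PySem.List.enumerate, List.foldl_cons, List.foldl_nil,
    List.length_append, List.length_singleton]
  by_cases hb : b
  · simp [hb]
  · simp [hb]; ring

theorem count_consecutive_skips_py_spec : Claim_equal_count_consecutive_skips_py := by
  intro l _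
  unfold Spec_count_consecutive_skips_py
  induction l using List.reverseRecOn with
  | nil => decide
  | append_singleton l b ih =>
    rw [A_append, B_append]
    by_cases hb : b <;> simp [hb, ih trivial]
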